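-- pv_equiv track=rewrite | github.com/ark2016/TFL | lab3/fazerD/CNF.py | remove_empty_rules
-- ===== SOURCE A (Python) =====
-- def remove_empty_rules(rules, vocabulary):
--     # Удаляет ε-правила (A → ε) из грамматики.
--     nullable = set()
--
--     # Шаг 1: Найти все nullable нетерминалы
--     for non_terminal, productions in rules.items():
--         for production in productions:
--             if production == []:  # ε-правило
--                 nullable.add(non_terminal)
--
--     updated = True
--     while updated:
--         updated = False
--         for non_terminal, productions in rules.items():
--             if non_terminal not in nullable:
--                 for production in productions:
--                     if all(symbol in nullable for symbol in production):
--                         nullable.add(non_terminal)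
--                         updated = True
--
--     # Шаг 2: Удалить ε-правила
--     new_rules = {}
--     for non_terminal, productions in rules.items():
--         new_rules[non_terminal] = []
--         for production in productions:
--             if production == []:
--                 continue
--             subsets = [[]]
--             for symbol in production:
--                 if symbol in nullable:
--                     subsets = [s + [symbol] for s in subsets] + [s for s in subsets]
--                 else:
--                     subsets = [s + [symbol] for s in subsets]
--             new_rules[non_terminal].extend([s for s in subsets if s])
--
--     return new_rules, vocabulary
-- ===== SOURCE B (Python) =====
-- def remove_empty_rules(rules, vocabulary):
--     # Phase 1: nullable set by round-based saturation over a shrinking pending list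
--     # (each round scans only the not-yet-nullable nonterminals, against the previous
--     # round's set), instead of A's repeated full rescans with in-pass mutation.
--     nullable = set()
--     for nt, prods in rules.items():
--         if [] in prods:
--             nullable.add(nt)
--     pending = [(nt, prods) for nt, prods in rules.items() if nt not in nullable]
--     while pending:
--         new, rest = [], []
--         for item in pending:
--             if any(all(s in nullable for s in prod) for prod in item[1]):
--                 new.append(item)
--             else:
--                 rest.append(item)
--         if not new:
--             break
--         for nt, _ in new:
--             nullable.add(nt)
--         pending = rest
--
--     # Phase 2: expand each production recursively from the right; a nullable symbol
--     # contributes both a kept and a dropped variant, interleaved per tail.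
--     def expand(prod):
--         if not prod:
--             return [[]]
--         tails = expand(prod[1:])
--         if prod[0] in nullable:
--             return [s for t in tails for s in ([prod[0]] + t, t)]
--         return [[prod[0]] + t for t in tails]
--
--     new_rules = {}
--     for nt, prods in rules.items():
--         new_rules[nt] = [s for prod in prods if prod for s in expand(prod) if s]
--     return new_rules, vocabulary
-- ===== Notes on version B (the rewrite author's own statement) =====
-- stated objective: alternative
-- what changed: Phase 1 replaces A's repeated full fixed-point rescans (with in-pass mutation) by round-based saturation over a shrinking pending list of not-yet-nullable nonterminals, and phase 2 replaces A's left-to-right subset-doubling fold by a right-recursive expansion that emits kept/dropped variants per tail; Pre_ only requires distinct rule keys, which every Python dict has.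
import Mathlib
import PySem

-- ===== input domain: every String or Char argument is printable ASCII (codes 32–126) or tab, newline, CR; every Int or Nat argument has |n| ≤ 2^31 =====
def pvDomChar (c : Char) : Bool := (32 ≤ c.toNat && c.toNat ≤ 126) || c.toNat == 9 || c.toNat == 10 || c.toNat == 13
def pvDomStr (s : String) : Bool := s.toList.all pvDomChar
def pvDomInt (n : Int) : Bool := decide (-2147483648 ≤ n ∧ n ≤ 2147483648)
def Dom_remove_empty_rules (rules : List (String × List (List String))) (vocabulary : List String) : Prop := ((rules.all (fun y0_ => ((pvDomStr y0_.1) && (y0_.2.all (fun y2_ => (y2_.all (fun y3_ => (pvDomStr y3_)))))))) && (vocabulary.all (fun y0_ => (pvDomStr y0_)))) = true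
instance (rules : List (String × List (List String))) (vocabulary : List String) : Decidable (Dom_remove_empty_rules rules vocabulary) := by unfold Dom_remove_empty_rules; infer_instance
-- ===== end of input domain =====

-- B changes the strategy of both phases (round-based saturation over a pending list for the
-- nullable set; right-recursive expansion of productions) while returning A's exact value.

-- ===== PORT A =====
-- step 1 seed: 'for nt, prods: for p in prods: if p == []: nullable.add(nt)'
def seedA (rules : List (String × List (List String))) : PySem.Set String :=
  rules.foldl (fun nb r =>
    r.2.foldl (fun nb2 p => if p = [] then PySem.Set.add nb2 r.1 else nb2) nb) PySem.Set.empty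

-- one inner production step of the fixed-point pass
def stepInA (nt : String) (st : PySem.Set String × Bool) (p : List String) : PySem.Set String × Bool :=
  if p.all (fun s => PySem.Set.contains st.1 s) then (PySem.Set.add st.1 nt, true) else st

-- one nonterminal of the fixed-point pass ('if nt not in nullable: for production …')
def stepOutA (st : PySem.Set String × Bool) (r : String × List (List String)) : PySem.Set String × Bool :=
  if PySem.Set.contains st.1 r.1 then st else r.2.foldl (stepInA r.1) st

-- one full 'for nt, prods in rules.items()' pass with 'updated = False' at entry
def passA (rules : List (String × List (List String))) (N : PySem.Set String) : PySem.Set String × Bool :=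
  rules.foldl stepOutA (N, false)

-- facts the 'while updated' loop needs for termination
theorem contains_eq_false {s : PySem.Set String} {x : String} :
    PySem.Set.contains s x = false ↔ x ∉ s := by
  constructor
  · intro h hm
    have h2 := (PySem.Set.contains_iff s x).2 hm
    rw [h2] at h
    simp at h
  · intro h
    cases hc : PySem.Set.contains s x
    · rfl
    · exact absurd ((PySem.Set.contains_iff s x).1 hc) h

theorem stepInA_fold_subset (nt : String) (ps : List (List String)) (st : PySem.Set String × Bool)
    (x : String) (hx : x ∈ st.1) : x ∈ (ps.foldl (stepInA nt) st).1 := by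
  induction ps generalizing st with
  | nil => exact hx
  | cons p rest ih =>
    simp only [List.foldl_cons]
    apply ih
    unfold stepInA
    split
    · exact (PySem.Set.mem_add _ _ _).2 (Or.inl hx)
    · exact hx

theorem stepOutA_fold_subset (rs : List (String × List (List String))) (st : PySem.Set String × Bool)
    (x : String) (hx : x ∈ st.1) : x ∈ (rs.foldl stepOutA st).1 := by
  induction rs generalizing st with
  | nil => exact hx
  | cons r rest ih =>
    simp only [List.foldl_cons]
    apply ih
    unfold stepOutA
    split
    · exact hx
    · exact stepInA_fold_subset _ _ _ _ hx

theorem stepInA_fold_upd (nt : String) (ps : List (List String)) (st : PySem.Set String × Bool)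
    (h : (ps.foldl (stepInA nt) st).2 = true) :
    st.2 = true ∨ nt ∈ (ps.foldl (stepInA nt) st).1 := by
  induction ps generalizing st with
  | nil => exact Or.inl h
  | cons p rest ih =>
    simp only [List.foldl_cons] at h ⊢
    rcases ih _ h with h2 | h2
    · by_cases hall : p.all (fun s => PySem.Set.contains st.1 s) = true
      · right
        apply stepInA_fold_subset
        show nt ∈ (stepInA nt st p).1
        unfold stepInA
        rw [if_pos hall]
        exact (PySem.Set.mem_add _ _ _).2 (Or.inr rfl)
      · left
        unfold stepInA at h2
        rw [if_neg hall] at h2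
        exact h2
    · exact Or.inr h2

theorem stepOutA_fold_upd (rs : List (String × List (List String))) (st : PySem.Set String × Bool)
    (h : (rs.foldl stepOutA st).2 = true) :
    st.2 = true ∨ ∃ r ∈ rs, r.1 ∉ st.1 ∧ r.1 ∈ (rs.foldl stepOutA st).1 := by
  induction rs generalizing st with
  | nil => exact Or.inl h
  | cons r rest ih =>
    simp only [List.foldl_cons] at h ⊢
    rcases ih _ h with h2 | h2
    · unfold stepOutA at h2
      split at h2
      · exact Or.inl h2
      · rename_i hc
        rcases stepInA_fold_upd _ _ _ h2 with h3 | h3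
        · exact Or.inl h3
        · right
          refine ⟨r, List.mem_cons_self .., fun hmem => hc ((PySem.Set.contains_iff _ _).2 hmem), ?_⟩
          have hrw : stepOutA st r = r.2.foldl (stepInA r.1) st := by
            unfold stepOutA
            rw [if_neg hc]
          rw [hrw]
          exact stepOutA_fold_subset _ _ _ h3
    · rcases h2 with ⟨r', hr', hnot, hmem⟩
      right
      refine ⟨r', List.mem_cons_of_mem _ hr', fun hx => hnot ?_, hmem⟩
      unfold stepOutA
      split
      · exact hx
      · exact stepInA_fold_subset _ _ _ _ hx

theorem filter_length_le {α : Type} (l : List α) (p q : α → Bool)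
    (hpq : ∀ x, q x = true → p x = true) : (l.filter q).length ≤ (l.filter p).length := by
  induction l with
  | nil => simp
  | cons a t ih =>
    rw [List.filter_cons, List.filter_cons]
    by_cases hq : q a = true
    · rw [if_pos hq, if_pos (hpq a hq)]
      simpa using ih
    · rw [if_neg hq]
      split
      · simp only [List.length_cons]
        omega
      · exact ih

theorem filter_length_lt {α : Type} (l : List α) (p q : α → Bool)
    (hpq : ∀ x, q x = true → p x = true) (x : α) (hx : x ∈ l)
    (hpx : p x = true) (hqx : q x = false) :
    (l.filter q).length < (l.filter p).length := by
  induction l with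
  | nil => cases hx
  | cons a t ih =>
    rw [List.filter_cons, List.filter_cons]
    rcases List.mem_cons.1 hx with rfl | hx'
    · rw [if_pos hpx, if_neg (by simp [hqx])]
      have := filter_length_le t p q hpq
      simp only [List.length_cons]
      omega
    · by_cases hq : q a = true
      · rw [if_pos hq, if_pos (hpq a hq)]
        simpa using ih hx'
      · rw [if_neg hq]
        have := ih hx'
        split
        · simp only [List.length_cons]
          omega
        · omega

-- 'while updated:' — terminates because each updating pass adds a rule key to nullable
def loopA (rules : List (String × List (List String))) (N : PySem.Set String) : PySem.Set String :=
  if (passA rules N).2 then loopA rules (passA rules N).1 else (passA rules N).1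
termination_by ((rules.map Prod.fst).filter (fun k => !(PySem.Set.contains N k))).length
decreasing_by
  rename_i h
  unfold passA at h ⊢
  rcases stepOutA_fold_upd rules (N, false) h with h2 | ⟨r, hr, hnot, hmem⟩
  · simp at h2
  · refine filter_length_lt _ _ _ ?_ r.1 (List.mem_map.2 ⟨r, hr, rfl⟩) ?_ ?_
    · intro k hk
      simp only [Bool.not_eq_true'] at hk ⊢
      exact contains_eq_false.2 fun hm =>
        contains_eq_false.1 hk (stepOutA_fold_subset _ _ _ hm)
    · simp only [Bool.not_eq_true']
      exact contains_eq_false.2 hnot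
    · simp only [Bool.not_eq_false']
      exact (PySem.Set.contains_iff _ _).2 hmem

-- 'subsets' fold over one production
def subsetsA (N : PySem.Set String) (p : List String) : List (List String) :=
  p.foldl (fun subs s =>
    if PySem.Set.contains N s then subs.map (fun t => t ++ [s]) ++ subs
    else subs.map (fun t => t ++ [s])) [[]]

-- step 2 body for one nonterminal ('continue' on ε, then extend with nonempty subsets).
-- (Python extends new_rules[nt], a fresh empty list, in place; ported as accumulating the
-- same list and storing it with one insert — the same dict value at the same key.)
def bodyA (N : PySem.Set String) (prods : List (List String)) : List (List String) :=
  prods.foldl (fun acc p =>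
    if p = [] then acc else acc ++ (subsetsA N p).filter (fun s => s ≠ [])) []

def remove_empty_rules (rules : List (String × List (List String))) (vocabulary : List String) : (List (String × List (List String))) × List String :=
  let nullable := loopA rules (seedA rules)
  let newRules := rules.foldl (fun d r => d.insert r.1 (bodyA nullable r.2)) PySem.Dict.empty
  (newRules.items, vocabulary)

-- ===== PORT B =====
-- seed: nonterminals with an ε-production
def seedB (rules : List (String × List (List String))) : PySem.Set String :=
  rules.foldl (fun s r => if r.2.contains ([] : List String) then PySem.Set.add s r.1 else s) PySem.Set.empty

-- does some production of r consist only of known-nullable symbols?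
def condB (N : PySem.Set String) (r : String × List (List String)) : Bool :=
  r.2.any (fun p => p.all (fun s => PySem.Set.contains N s))

-- round-based saturation: move newly-nullable items out of pending until a round finds none
def satB (N : PySem.Set String) (pending : List (String × List (List String))) : PySem.Set String :=
  if pending = [] then N
  else
    let part := pending.partition (condB N)
    if part.1 = [] then N
    else satB (part.1.foldl (fun s r => PySem.Set.add s r.1) N) part.2
termination_by pending.length
decreasing_by
  rename_i hne hnew
  simp only [part, List.partition_eq_filter_filter] at hnew ⊢
  have hx : ∃ x ∈ pending, condB N x = true := by
    by_contra hall
    push Not at hall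
    exact hnew (List.filter_eq_nil_iff.2 hall)
  rcases hx with ⟨x, hxm, hxc⟩
  have h := filter_length_lt pending (fun _ => true) (fun a => !condB N a)
    (fun _ _ => rfl) x hxm rfl (by simp [hxc])
  simpa using h

def nullableB (rules : List (String × List (List String))) : PySem.Set String :=
  satB (seedB rules) (rules.filter (fun r => !(PySem.Set.contains (seedB rules) r.1)))

-- right-recursive expansion: a nullable head yields a kept and a dropped variant per tail
def expandB (N : PySem.Set String) : List String → List (List String)
  | [] => [[]]
  | s :: rest =>
    let tails := expandB N rest
    if PySem.Set.contains N s then tails.flatMap (fun t => [s :: t, t])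
    else tails.map (fun t => s :: t)

def bodyB (N : PySem.Set String) (prods : List (List String)) : List (List String) :=
  (prods.filter (fun p => p ≠ [])).flatMap (fun p => (expandB N p).filter (fun s => s ≠ []))

def remove_empty_rules_alt (rules : List (String × List (List String))) (vocabulary : List String) : (List (String × List (List String))) × List String :=
  let nullable := nullableB rules
  (rules.map (fun r => (r.1, bodyB nullable r.2)), vocabulary)

-- ===== PRECONDITION & SPEC =====
-- Pre_ only requires the rule keys to be distinct: 'rules' ports a Python dict, whose keys
-- are distinct by construction, so no actual Python input is excluded.
def Pre_remove_empty_rules (rules : List (String × List (List String))) (vocabulary : List String) : Prop :=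
  (rules.map Prod.fst).Nodup
instance (rules : List (String × List (List String))) (vocabulary : List String) : Decidable (Pre_remove_empty_rules rules vocabulary) := by unfold Pre_remove_empty_rules; infer_instance

def pvWitness_remove_empty_rules : (List (String × List (List String))) × List String :=
  ([("S", [["A", "a"], []]), ("A", [["a"], []])], ["a"])

def Spec_remove_empty_rules (rules : List (String × List (List String))) (vocabulary : List String) (out : (List (String × List (List String))) × List String) : Prop := out = remove_empty_rules_alt rules vocabulary
instance (rules : List (String × List (List String))) (vocabulary : List String) (out : (List (String × List (List String))) × List String) : Decidable (Spec_remove_empty_rules rules vocabulary out) := by unfold Spec_remove_empty_rules; infer_instance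

-- ===== CLAIM (what is proved, stated in full; the proofs are below) =====
def Claim_equal_remove_empty_rules : Prop := ∀ (rules : List (String × List (List String))) (vocabulary : List String), Dom_remove_empty_rules rules vocabulary → Pre_remove_empty_rules rules vocabulary → Spec_remove_empty_rules rules vocabulary (remove_empty_rules rules vocabulary)

-- ===== LEMMAS AND PROOFS =====

-- a set (as membership) closed under the grammar's one-step nullability rule
def ClosedP (rules : List (String × List (List String))) (M : List String) : Prop :=
  ∀ r ∈ rules, (∃ p ∈ r.2, ∀ s ∈ p, s ∈ M) → r.1 ∈ M

theorem all_contains_iff (N : PySem.Set String) (p : List String) :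
    p.all (fun s => PySem.Set.contains N s) = true ↔ ∀ s ∈ p, s ∈ N := by
  simp only [List.all_eq_true]
  constructor
  · exact fun h s hs => (PySem.Set.contains_iff _ _).1 (h s hs)
  · exact fun h s hs => (PySem.Set.contains_iff _ _).2 (h s hs)

theorem condB_iff (N : PySem.Set String) (r : String × List (List String)) :
    condB N r = true ↔ ∃ p ∈ r.2, ∀ s ∈ p, s ∈ N := by
  unfold condB
  simp only [List.any_eq_true]
  constructor
  · rintro ⟨p, hp, h⟩
    exact ⟨p, hp, (all_contains_iff N p).1 h⟩
  · rintro ⟨p, hp, h⟩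
    exact ⟨p, hp, (all_contains_iff N p).2 h⟩

-- seed membership characterisations
theorem mem_seedA_inner (nt x : String) (ps : List (List String)) (nb : PySem.Set String) :
    x ∈ ps.foldl (fun nb2 p => if p = [] then PySem.Set.add nb2 nt else nb2) nb ↔
      x ∈ nb ∨ (x = nt ∧ [] ∈ ps) := by
  induction ps generalizing nb with
  | nil => simp
  | cons p rest ih =>
    simp only [List.foldl_cons]
    by_cases hp : p = []
    · subst hp
      rw [if_pos rfl, ih, PySem.Set.mem_add]
      have h1 : ([] : List String) ∈ ([] : List String) :: rest := List.mem_cons_self ..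
      tauto
    · rw [if_neg hp, ih]
      have h1 : (([] : List String) ∈ p :: rest) ↔ (([] : List String) ∈ rest) := by
        simp only [List.mem_cons]
        have : ¬(([] : List String) = p) := fun hh => hp hh.symm
        tauto
      rw [h1]

theorem mem_seedA (rules : List (String × List (List String))) (x : String) :
    x ∈ seedA rules ↔ ∃ r ∈ rules, x = r.1 ∧ [] ∈ r.2 := by
  unfold seedA
  have h : ∀ (rs : List (String × List (List String))) (nb : PySem.Set String),
      x ∈ rs.foldl (fun nb r => r.2.foldl (fun nb2 p => if p = [] then PySem.Set.add nb2 r.1 else nb2) nb) nb ↔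
        x ∈ nb ∨ ∃ r ∈ rs, x = r.1 ∧ [] ∈ r.2 := by
    intro rs
    induction rs with
    | nil => simp
    | cons r rest ih =>
      intro nb
      simp only [List.foldl_cons, ih, mem_seedA_inner]
      constructor
      · rintro ((hnb | hr) | ⟨r', hr', h⟩)
        · exact Or.inl hnb
        · exact Or.inr ⟨r, List.mem_cons_self .., hr⟩
        · exact Or.inr ⟨r', List.mem_cons_of_mem _ hr', h⟩
      · rintro (hnb | ⟨r', hr', h⟩)
        · exact Or.inl (Or.inl hnb)
        · rcases List.mem_cons.1 hr' with rfl | hr''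
          · exact Or.inl (Or.inr h)
          · exact Or.inr ⟨r', hr'', h⟩
  rw [h]
  simp [PySem.Set.empty]

theorem mem_seedB (rules : List (String × List (List String))) (x : String) :
    x ∈ seedB rules ↔ ∃ r ∈ rules, x = r.1 ∧ [] ∈ r.2 := by
  unfold seedB
  have h : ∀ (rs : List (String × List (List String))) (nb : PySem.Set String),
      x ∈ rs.foldl (fun s r => if r.2.contains ([] : List String) then PySem.Set.add s r.1 else s) nb ↔
        x ∈ nb ∨ ∃ r ∈ rs, x = r.1 ∧ [] ∈ r.2 := by
    intro rs
    induction rs with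
    | nil => simp
    | cons r rest ih =>
      intro nb
      simp only [List.foldl_cons]
      by_cases hc : r.2.contains ([] : List String) = true
      · rw [if_pos hc, ih]
        rw [List.contains_iff_mem] at hc
        rw [PySem.Set.mem_add]
        constructor
        · rintro ((hnb | rfl) | ⟨r', hr', h⟩)
          · exact Or.inl hnb
          · exact Or.inr ⟨r, List.mem_cons_self .., rfl, hc⟩
          · exact Or.inr ⟨r', List.mem_cons_of_mem _ hr', h⟩
        · rintro (hnb | ⟨r', hr', h⟩)
          · exact Or.inl (Or.inl hnb)
          · rcases List.mem_cons.1 hr' with rfl | hr''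
            · exact Or.inl (Or.inr h.1)
            · exact Or.inr ⟨r', hr'', h⟩
      · rw [if_neg hc, ih]
        rw [List.contains_iff_mem] at hc
        constructor
        · rintro (hnb | ⟨r', hr', h⟩)
          · exact Or.inl hnb
          · exact Or.inr ⟨r', List.mem_cons_of_mem _ hr', h⟩
        · rintro (hnb | ⟨r', hr', h⟩)
          · exact Or.inl hnb
          · rcases List.mem_cons.1 hr' with rfl | hr''
            · exact absurd h.2 hc
            · exact Or.inr ⟨r', hr'', h⟩
  rw [h]
  simp [PySem.Set.empty]

-- a pass that reports no update leaves the set unchanged and certifies closedness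
theorem stepInA_fold_flag (nt : String) (ps : List (List String)) (st : PySem.Set String × Bool)
    (h : st.2 = true) : (ps.foldl (stepInA nt) st).2 = true := by
  induction ps generalizing st with
  | nil => exact h
  | cons p rest ih =>
    simp only [List.foldl_cons]
    apply ih
    unfold stepInA
    split <;> simp [h]

theorem stepInA_fold_false (nt : String) (ps : List (List String)) (st : PySem.Set String × Bool)
    (h : (ps.foldl (stepInA nt) st).2 = false) :
    ps.foldl (stepInA nt) st = st ∧
      ∀ p ∈ ps, p.all (fun s => PySem.Set.contains st.1 s) = false := by
  induction ps generalizing st with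
  | nil => simp
  | cons p rest ih =>
    simp only [List.foldl_cons] at h ⊢
    by_cases hall : p.all (fun s => PySem.Set.contains st.1 s) = true
    · exfalso
      have hflag : (rest.foldl (stepInA nt) (stepInA nt st p)).2 = true := by
        apply stepInA_fold_flag
        unfold stepInA
        rw [if_pos hall]
      rw [hflag] at h
      cases h
    · have hst : stepInA nt st p = st := by
        unfold stepInA
        rw [if_neg hall]
      rw [hst] at h ⊢
      rcases ih _ h with ⟨h1, h2⟩
      refine ⟨h1, fun q hq => ?_⟩
      rcases List.mem_cons.1 hq with rfl | hq'
      · simpa using hall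
      · exact h2 q hq'

theorem stepOutA_fold_flag (rs : List (String × List (List String))) (st : PySem.Set String × Bool)
    (h : st.2 = true) : (rs.foldl stepOutA st).2 = true := by
  induction rs generalizing st with
  | nil => exact h
  | cons r rest ih =>
    simp only [List.foldl_cons]
    apply ih
    unfold stepOutA
    split
    · exact h
    · exact stepInA_fold_flag _ _ _ h

theorem stepOutA_fold_false (rs : List (String × List (List String))) (st : PySem.Set String × Bool)
    (h : (rs.foldl stepOutA st).2 = false) :
    rs.foldl stepOutA st = st ∧
      ∀ r ∈ rs, r.1 ∉ st.1 →
        ∀ p ∈ r.2, p.all (fun s => PySem.Set.contains st.1 s) = false := by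
  induction rs generalizing st with
  | nil => simp
  | cons r rest ih =>
    simp only [List.foldl_cons] at h ⊢
    have hstep : (stepOutA st r).2 = false := by
      cases hc : (stepOutA st r).2
      · rfl
      · rw [stepOutA_fold_flag rest _ hc] at h
        cases h
    have hkeep : stepOutA st r = st := by
      unfold stepOutA at hstep ⊢
      split at hstep
      · split
        · rfl
        · simp_all
      · split
        · simp_all
        · exact (stepInA_fold_false _ _ _ hstep).1
    rw [hkeep] at h ⊢
    rcases ih _ h with ⟨h1, h2⟩
    refine ⟨h1, ?_⟩
    intro r' hr' hnot
    rcases List.mem_cons.1 hr' with rfl | hr''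
    · intro p hp
      have hguard : PySem.Set.contains st.1 r'.1 = false := contains_eq_false.2 hnot
      have hinner : stepOutA st r' = r'.2.foldl (stepInA r'.1) st := by
        unfold stepOutA
        rw [if_neg (by rw [hguard]; exact fun hh => by cases hh)]
      have hfalse : (r'.2.foldl (stepInA r'.1) st).2 = false := by
        rw [← hinner]
        exact hstep
      exact (stepInA_fold_false _ _ _ hfalse).2 p hp
    · exact h2 r' hr'' hnot

-- minimality: every addition is justified, so the pass stays inside any closed superset
theorem stepInA_fold_min (rules : List (String × List (List String))) (M : List String)
    (hM : ClosedP rules M) (r : String × List (List String)) (hr : r ∈ rules)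
    (ps : List (List String)) (hps : ∀ p ∈ ps, p ∈ r.2) (st : PySem.Set String × Bool)
    (hst : ∀ x ∈ st.1, x ∈ M) :
    ∀ x ∈ (ps.foldl (stepInA r.1) st).1, x ∈ M := by
  induction ps generalizing st with
  | nil => exact hst
  | cons p rest ih =>
    simp only [List.foldl_cons]
    apply ih (fun q hq => hps q (List.mem_cons_of_mem _ hq))
    unfold stepInA
    split
    · intro x hx
      rcases (PySem.Set.mem_add _ _ _).1 hx with hx | rfl
      · exact hst x hx
      · apply hM r hr
        refine ⟨p, hps p (List.mem_cons_self ..), ?_⟩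
        intro s hs
        exact hst s ((all_contains_iff _ _).1 (by assumption) s hs)
    · exact hst

theorem passA_min (rules : List (String × List (List String))) (M : List String)
    (hM : ClosedP rules M) (N : PySem.Set String) (hN : ∀ x ∈ N, x ∈ M) :
    ∀ x ∈ (passA rules N).1, x ∈ M := by
  unfold passA
  have h : ∀ (rs : List (String × List (List String))), (∀ r ∈ rs, r ∈ rules) →
      ∀ (st : PySem.Set String × Bool), (∀ x ∈ st.1, x ∈ M) →
        ∀ x ∈ (rs.foldl stepOutA st).1, x ∈ M := by
    intro rs
    induction rs with
    | nil => exact fun _ st hst => hst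
    | cons r rest ih =>
      intro hsub st hst
      simp only [List.foldl_cons]
      apply ih (fun r' hr' => hsub r' (List.mem_cons_of_mem _ hr'))
      unfold stepOutA
      split
      · exact hst
      · exact stepInA_fold_min rules M hM r (hsub r (List.mem_cons_self ..)) r.2 (fun p hp => hp) st hst
  exact h rules (fun r hr => hr) (N, false) hN

-- the while-loop's result: a superset of the start, closed, and inside any closed superset
theorem loopA_supset (rules : List (String × List (List String))) (N : PySem.Set String)
    (x : String) (hx : x ∈ N) : x ∈ loopA rules N := by
  fun_induction loopA rules N with
  | case1 N h ih => exact ih (stepOutA_fold_subset _ _ _ hx)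
  | case2 N h => exact stepOutA_fold_subset _ _ _ hx

theorem loopA_closed (rules : List (String × List (List String))) (N : PySem.Set String) :
    ClosedP rules (loopA rules N) := by
  fun_induction loopA rules N with
  | case1 N h ih => exact ih
  | case2 N h =>
    simp only [Bool.not_eq_true] at h
    rcases stepOutA_fold_false rules (N, false) h with ⟨h1, h2⟩
    intro r hr ⟨p, hp, hall⟩
    have hres : (passA rules N).1 = N := by
      unfold passA
      rw [h1]
    rw [hres] at hall ⊢
    by_cases hin : r.1 ∈ N
    · exact hin
    · exfalso
      have := h2 r hr hin p hp
      rw [(all_contains_iff N p).2 hall] at this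
      cases this

theorem loopA_min (rules : List (String × List (List String))) (M : List String)
    (hM : ClosedP rules M) (N : PySem.Set String) :
    (∀ x ∈ N, x ∈ M) → ∀ x ∈ loopA rules N, x ∈ M := by
  fun_induction loopA rules N with
  | case1 N h ih => exact fun hN => ih (passA_min rules M hM N hN)
  | case2 N h => exact fun hN => passA_min rules M hM N hN

-- the saturation loop's result: superset, inside any closed superset, and closed
theorem satB_supset (x : String) (N : PySem.Set String)
    (pending : List (String × List (List String))) :
    x ∈ N → x ∈ satB N pending := by
  fun_induction satB N pending with
  | case1 N => exact id
  | case2 N pending hne part hempty => exact id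
  | case3 N pending hne part hnew ih =>
    intro hx
    exact ih ((PySem.Set.mem_foldl_add _ _ _ _).2 (Or.inl hx))

theorem satB_min (rules : List (String × List (List String))) (M : List String)
    (hM : ClosedP rules M) (N : PySem.Set String) (pending : List (String × List (List String))) :
    (∀ r ∈ pending, r ∈ rules) → (∀ x ∈ N, x ∈ M) → ∀ x ∈ satB N pending, x ∈ M := by
  fun_induction satB N pending with
  | case1 N => exact fun _ hN => hN
  | case2 N pending hne part hempty => exact fun _ hN => hN
  | case3 N pending hne part hnew ih =>
    intro hpend hN
    apply ih
    · intro r hr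
      apply hpend
      simp only [part, List.partition_eq_filter_filter] at hr
      exact List.mem_of_mem_filter hr
    · intro x hx
      rcases (PySem.Set.mem_foldl_add _ _ _ _).1 hx with hx | ⟨r, hr, rfl⟩
      · exact hN x hx
      · simp only [part, List.partition_eq_filter_filter] at hr
        have hcond := List.of_mem_filter hr
        rcases (condB_iff N r).1 hcond with ⟨p, hp, hps⟩
        exact hM r (hpend r (List.mem_of_mem_filter hr)) ⟨p, hp, fun s hs => hN s (hps s hs)⟩

theorem satB_closed (rules : List (String × List (List String)))
    (N : PySem.Set String) (pending : List (String × List (List String))) :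
    (∀ r ∈ rules, r.1 ∈ N ∨ r ∈ pending) → ClosedP rules (satB N pending) := by
  fun_induction satB N pending with
  | case1 N =>
    intro hinv r hr _
    rcases hinv r hr with hm | hm
    · exact hm
    · cases hm
  | case2 N pending hne part hempty =>
    intro hinv r hr hex
    rcases hex with ⟨p, hp, hall⟩
    rcases hinv r hr with hm | hm
    · exact hm
    · exfalso
      have hcond : condB N r = true := (condB_iff N r).2 ⟨p, hp, hall⟩
      have hmem : r ∈ part.1 := by
        simp only [part, List.partition_eq_filter_filter]
        exact List.mem_filter.2 ⟨hm, hcond⟩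
      rw [hempty] at hmem
      cases hmem
  | case3 N pending hne part hnew ih =>
    intro hinv
    apply ih
    intro r hr
    rcases hinv r hr with hm | hm
    · exact Or.inl ((PySem.Set.mem_foldl_add _ _ _ _).2 (Or.inl hm))
    · by_cases hc : condB N r = true
      · left
        apply (PySem.Set.mem_foldl_add _ _ _ _).2
        right
        refine ⟨r, ?_, rfl⟩
        simp only [part, List.partition_eq_filter_filter]
        exact List.mem_filter.2 ⟨hm, hc⟩
      · right
        simp only [part, List.partition_eq_filter_filter]
        exact List.mem_filter.2 ⟨hm, by simp [hc]⟩

-- the two nullable sets have the same members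
theorem null_agree (rules : List (String × List (List String))) (x : String) :
    x ∈ loopA rules (seedA rules) ↔ x ∈ nullableB rules := by
  constructor
  · intro hx
    apply loopA_min rules (nullableB rules) ?_ (seedA rules) ?_ x hx
    · exact satB_closed rules _ _ (by
        intro r hr
        by_cases hc : PySem.Set.contains (seedB rules) r.1 = true
        · exact Or.inl ((PySem.Set.contains_iff _ _).1 hc)
        · right
          refine List.mem_filter.2 ⟨hr, ?_⟩
          simp only [Bool.not_eq_true']
          exact contains_eq_false.2 fun hm => hc ((PySem.Set.contains_iff _ _).2 hm))
    · intro y hy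
      apply satB_supset
      exact (mem_seedB rules y).2 ((mem_seedA rules y).1 hy)
  · intro hx
    apply satB_min rules (loopA rules (seedA rules)) (loopA_closed rules (seedA rules))
      (seedB rules) _ (fun r hr => List.mem_of_mem_filter hr) ?_ x hx
    intro y hy
    exact loopA_supset rules (seedA rules) y ((mem_seedA rules y).2 ((mem_seedB rules y).1 hy))

theorem contains_agree (rules : List (String × List (List String))) (s : String) :
    PySem.Set.contains (loopA rules (seedA rules)) s = PySem.Set.contains (nullableB rules) s := by
  cases hc : PySem.Set.contains (nullableB rules) s
  · exact contains_eq_false.2 fun hm => contains_eq_false.1 hc ((null_agree rules s).1 hm)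
  · exact (PySem.Set.contains_iff _ _).2 ((null_agree rules s).2 ((PySem.Set.contains_iff _ _).1 hc))

-- the expansion depends only on membership answers
theorem expandB_congr (N1 N2 : PySem.Set String)
    (h : ∀ s, PySem.Set.contains N1 s = PySem.Set.contains N2 s) (p : List String) :
    expandB N1 p = expandB N2 p := by
  induction p with
  | nil => rfl
  | cons s rest ih =>
    unfold expandB
    rw [h s, ih]

-- A's left-to-right doubling fold equals B's right recursion
theorem subsets_fold_general (N : PySem.Set String) (p : List String) :
    ∀ acc : List (List String),
      p.foldl (fun subs s =>
        if PySem.Set.contains N s then subs.map (fun t => t ++ [s]) ++ subs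
        else subs.map (fun t => t ++ [s])) acc =
      (expandB N p).flatMap (fun t => acc.map (fun a => a ++ t)) := by
  induction p with
  | nil =>
    intro acc
    simp [expandB]
  | cons s rest ih =>
    intro acc
    simp only [List.foldl_cons]
    rw [ih]
    have hexp : expandB N (s :: rest) =
        (if PySem.Set.contains N s = true then (expandB N rest).flatMap (fun t => [s :: t, t])
         else (expandB N rest).map (fun t => s :: t)) := rfl
    by_cases hc : PySem.Set.contains N s = true
    · rw [hexp, if_pos hc, if_pos hc, List.flatMap_assoc]
      congr 1
      funext t
      simp [List.map_append, List.map_map, Function.comp_def, List.append_assoc]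
    · rw [hexp, if_neg hc, if_neg hc, List.flatMap_map]
      congr 1
      funext t
      simp [List.map_map, Function.comp_def, List.append_assoc]

theorem subsetsA_eq_expandB (N : PySem.Set String) (p : List String) :
    subsetsA N p = expandB N p := by
  unfold subsetsA
  rw [subsets_fold_general]
  simp

theorem bodyA_flatMap (N : PySem.Set String) (prods : List (List String)) :
    bodyA N prods =
      (prods.filter (fun p => p ≠ [])).flatMap (fun p => (subsetsA N p).filter (fun s => s ≠ [])) := by
  unfold bodyA
  have h : ∀ (ps : List (List String)) (acc : List (List String)),
      ps.foldl (fun acc p => if p = [] then acc else acc ++ (subsetsA N p).filter (fun s => s ≠ [])) acc =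
        acc ++ (ps.filter (fun p => p ≠ [])).flatMap (fun p => (subsetsA N p).filter (fun s => s ≠ [])) := by
    intro ps
    induction ps with
    | nil => simp
    | cons p rest ih =>
      intro acc
      simp only [List.foldl_cons, List.filter_cons]
      by_cases hp : p = []
      · subst hp
        rw [if_pos rfl, if_neg (by simp), ih]
      · rw [if_neg hp, if_pos (by simp [hp]), ih]
        simp
  rw [h]
  simp

theorem bodyA_eq_bodyB (rules : List (String × List (List String))) (prods : List (List String)) :
    bodyA (loopA rules (seedA rules)) prods = bodyB (nullableB rules) prods := by
  rw [bodyA_flatMap]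
  unfold bodyB
  congr 1
  funext p
  rw [subsetsA_eq_expandB, expandB_congr _ _ (contains_agree rules) p]

-- ===== VERDICT (by name: the statement is the Claim_ definition above) =====
theorem remove_empty_rules_spec : Claim_equal_remove_empty_rules := by
  intro rules vocabulary hdom hpre
  unfold Pre_remove_empty_rules at hpre
  simp only [Spec_remove_empty_rules, remove_empty_rules, remove_empty_rules_alt]
  refine Prod.ext ?_ rfl
  rw [PySem.Dict.items_foldl_insert_fresh (k := Prod.fst) (v := fun r => bodyA (loopA rules (seedA rules)) r.2)
    rules PySem.Dict.empty (by intro a _; rfl) hpre]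
  simp only [PySem.Dict.empty, List.nil_append]
  apply List.map_congr_left
  intro r _
  rw [bodyA_eq_bodyB]
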